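-- pv_equiv track=rewrite | github.com/bdvil/pyrefactorlsp | src/pyrefactorlsp/refactor/diffs.py | str_index_to_line_offset
-- ===== SOURCE A (Python) =====
-- from collections.abc import Sequence
--
-- def str_index_to_line_offset(
--     text: str, idx: Sequence[int]
-- ) -> dict[int, tuple[int, int]]:
--     locations: dict[int, tuple[int, int]] = {}
--     cur_line, cur_offset = 0, 0
--     for k, c in enumerate(text):
--         if k in idx:
--             locations[k] = (cur_line, cur_offset)
--         if c == "\n":
--             cur_line += 1
--             cur_offset = 0
--             continue
--         cur_offset += 1
--     return locations
-- ===== SOURCE B (Python) =====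
-- from collections.abc import Sequence
--
--
-- def str_index_to_line_offset(
--     text: str, idx: Sequence[int]
-- ) -> dict[int, tuple[int, int]]:
--     # Build the newline-position table once, then answer each queried index
--     # from it instead of scanning text with a per-character membership test.
--     newlines = [i for i, c in enumerate(text) if c == "\n"]
--     locations: dict[int, tuple[int, int]] = {}
--     for k in sorted({i for i in idx if 0 <= i < len(text)}):
--         line = len([p for p in newlines if p < k])
--         offset = k if line == 0 else k - newlines[line - 1] - 1
--         locations[k] = (line, offset)
--     return locations
-- ===== Notes on version B (the rewrite author's own statement) =====
-- stated objective: faster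
-- what changed: Instead of scanning the text character by character while carrying a running (line, offset) state and testing every position for membership in idx, B builds the table of newline positions in one pass and then answers only the queried indices (sorted, deduplicated, range-filtered) directly from that table.
import Mathlib
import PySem

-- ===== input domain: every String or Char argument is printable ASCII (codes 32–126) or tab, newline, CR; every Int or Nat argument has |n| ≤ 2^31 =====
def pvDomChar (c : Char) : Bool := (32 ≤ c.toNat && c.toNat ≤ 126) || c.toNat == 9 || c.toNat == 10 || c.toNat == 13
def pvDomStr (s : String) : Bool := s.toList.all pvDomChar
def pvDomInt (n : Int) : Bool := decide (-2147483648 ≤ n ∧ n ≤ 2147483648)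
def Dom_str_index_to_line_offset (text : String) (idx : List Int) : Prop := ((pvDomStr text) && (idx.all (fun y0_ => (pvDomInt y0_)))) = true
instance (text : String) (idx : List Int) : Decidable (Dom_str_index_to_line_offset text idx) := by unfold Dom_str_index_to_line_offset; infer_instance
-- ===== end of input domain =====

-- B rebuilds the result from a one-pass newline-position table queried per index,
-- instead of A's character-by-character scan with a membership test at every position (objective: faster; measured faster in a timing run).

-- ===== PORT A =====
-- the loop body of A: state is (locations as an assoc list — keys k are strictly increasing,
-- so dict insertion is appending a fresh key — , cur_line, cur_offset)
def strA_step (idx : List Int) (st : List (Int × Int × Int) × Int × Int) (kc : Int × Char) :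
    List (Int × Int × Int) × Int × Int :=
  let locs := if kc.1 ∈ idx then st.1 ++ [(kc.1, st.2.1, st.2.2)] else st.1
  if kc.2 = '\n' then (locs, st.2.1 + 1, 0) else (locs, st.2.1, st.2.2 + 1)

def str_index_to_line_offset (text : String) (idx : List Int) : List (Int × Int × Int) :=
  ((PySem.List.enumerate text.toList 0).foldl (strA_step idx) ([], 0, 0)).1

-- ===== PORT B =====
-- newlines = [i for i, c in enumerate(text) if c == "\n"]
def strB_newlines (cs : List Char) : List Int :=
  ((PySem.List.enumerate cs 0).filter (fun kc => kc.2 = '\n')).map (·.1)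

def str_index_to_line_offset_alt (text : String) (idx : List Int) : List (Int × Int × Int) :=
  let cs := text.toList
  let n : Int := (cs.length : Int)
  let newlines := strB_newlines cs
  -- sorted({i for i in idx if 0 <= i < len(text)})
  let keys : List Int :=
    PySem.List.sorted (PySem.Set.ofList (idx.filter (fun i => decide (0 ≤ i) && decide (i < n)))) (fun x => x) false
  keys.foldl (fun locs k =>
    -- line = len([p for p in newlines if p < k])
    let line : Int := ((newlines.filter (fun p => decide (p < k))).length : Int)
    -- offset = k if line == 0 else k - newlines[line - 1] - 1  (index always in range here)
    let offset : Int := if line = 0 then k else k - PySem.List.pyGetD newlines (line - 1) 0 - 1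
    locs ++ [(k, line, offset)]) []

-- ===== PRECONDITION & SPEC =====
def Spec_str_index_to_line_offset (text : String) (idx : List Int) (out : List (Int × Int × Int)) : Prop := out = str_index_to_line_offset_alt text idx
instance (text : String) (idx : List Int) (out : List (Int × Int × Int)) : Decidable (Spec_str_index_to_line_offset text idx out) := by unfold Spec_str_index_to_line_offset; infer_instance

-- ===== CLAIM (what is proved, stated in full; the proofs are below) =====
def Claim_equal_str_index_to_line_offset : Prop := ∀ (text : String) (idx : List Int), Dom_str_index_to_line_offset text idx → Spec_str_index_to_line_offset text idx (str_index_to_line_offset text idx)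

-- ===== LEMMAS AND PROOFS =====

-- the running (cur_line, cur_offset) state of A after k characters
def stepCh (st : Int × Int) (c : Char) : Int × Int :=
  if c = '\n' then (st.1 + 1, 0) else (st.1, st.2 + 1)

def stateAt (cs : List Char) (k : Nat) : Int × Int := (cs.take k).foldl stepCh (0, 0)

-- newline positions / count as naturals
def nlN (cs : List Char) : List Nat :=
  (List.range cs.length).filter (fun j => decide (cs.getD j ' ' = '\n'))

def cnt (cs : List Char) (k : Nat) : Nat :=
  ((List.range k).filter (fun j => decide (cs.getD j ' ' = '\n'))).length

lemma strB_newlines_eq (cs : List Char) :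
    strB_newlines cs = (nlN cs).map (fun (j : Nat) => (j : Int)) := by
  simp only [strB_newlines, PySem.List.enumerate_eq_map_pyRange cs ' ', PySem.List.pyRange_one,
    List.filter_map, List.map_map, PySem.List.len_eq, Function.comp_def, zero_add, Int.sub_zero,
    Int.toNat_natCast, PySem.List.pyGetD_natCast, nlN]

lemma cnt_le_length (cs : List Char) (k : Nat) (hk : k ≤ cs.length) :
    cnt cs k ≤ (nlN cs).length := by
  unfold cnt nlN
  conv_rhs => rw [show cs.length = k + (cs.length - k) from by omega, List.range_add]
  rw [List.filter_append, List.length_append]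
  omega

-- filtering the newline table below k counts newlines among the first k characters
lemma nlN_filter_lt (cs : List Char) (k : Nat) (hk : k ≤ cs.length) :
    ((nlN cs).filter (fun j => decide (j < k))).length = cnt cs k := by
  unfold nlN cnt
  rw [List.filter_filter]
  rw [show cs.length = k + (cs.length - k) from by omega, List.range_add, List.filter_append]
  have h2 : (List.filter (fun a => decide (a < k) && decide (cs.getD a ' ' = '\n'))
      ((List.range (cs.length - k)).map (fun x => k + x))) = [] := by
    apply List.filter_eq_nil_iff.mpr
    intro a ha
    rcases List.mem_map.mp ha with ⟨x, _, rfl⟩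
    simp
  rw [h2, List.append_nil]
  congr 1
  apply List.filter_congr
  intro a ha
  have : a < k := List.mem_range.mp ha
  simp [this]

-- the (cnt k)-th newline is position k itself, when cs[k] is a newline
lemma nlN_getElem_cnt (cs : List Char) (k : Nat) (hk : k < cs.length)
    (hnl : cs.getD k ' ' = '\n') : (nlN cs)[cnt cs k]? = some k := by
  unfold nlN cnt
  rw [show cs.length = (k + 1) + (cs.length - (k + 1)) from by omega, List.range_add,
    List.filter_append, List.range_succ, List.filter_append]
  have hnl' : cs[k]?.getD ' ' = '\n' := by rw [← List.getD_eq_getElem?_getD]; exact hnl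
  have hk1 : List.filter (fun j => decide (cs.getD j ' ' = '\n')) [k] = [k] := by simp [hnl']
  rw [hk1, List.append_assoc, List.getElem?_append_right (by simp), Nat.sub_self]
  rfl

lemma stateAt_succ (cs : List Char) (k : Nat) (hk : k < cs.length) :
    stateAt cs (k + 1) = stepCh (stateAt cs k) (cs.getD k ' ') := by
  unfold stateAt
  rw [List.take_succ, List.getElem?_eq_getElem hk, List.foldl_append, List.getD_eq_getElem cs ' ' hk]
  rfl

lemma cnt_succ (cs : List Char) (k : Nat) :
    cnt cs (k + 1) = cnt cs k + (if cs.getD k ' ' = '\n' then 1 else 0) := by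
  unfold cnt
  rw [List.range_succ, List.filter_append, List.length_append]
  have h' : (cs[k]?.getD ' ' = '\n') ↔ (cs.getD k ' ' = '\n') := by
    rw [← List.getD_eq_getElem?_getD]
  simp only [List.filter_cons, List.filter_nil, ← List.getD_eq_getElem?_getD]
  split <;> simp_all

-- characterisation of A's running state at position k
lemma stateAt_spec (cs : List Char) (k : Nat) (hk : k ≤ cs.length) :
    stateAt cs k = ((cnt cs k : Int),
      if cnt cs k = 0 then (k : Int)
      else (k : Int) - ((nlN cs).getD (cnt cs k - 1) 0 : Int) - 1) := by
  induction k with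
  | zero => simp [stateAt, cnt]
  | succ k ih =>
    have hk' : k < cs.length := by omega
    have ihe := ih (Nat.le_of_lt hk')
    rw [stateAt_succ cs k hk', ihe, cnt_succ]
    by_cases hc : cs.getD k ' ' = '\n'
    · have hget := nlN_getElem_cnt cs k hk' hc
      have hgetD : (nlN cs).getD (cnt cs k) 0 = k := by
        rw [List.getD_eq_getElem?_getD, hget]; rfl
      have hne : ¬ (cnt cs k + 1 = 0) := by omega
      simp only [hc, stepCh, if_true, hne, if_false, Nat.add_sub_cancel, hgetD]
      exact Prod.ext_iff.mpr ⟨by push_cast; ring, by push_cast; omega⟩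
    · have hz : (if cs.getD k ' ' = '\n' then 1 else 0) = 0 := by rw [if_neg hc]
      simp only [stepCh, hc, reduceIte, hz, Nat.add_zero]
      by_cases h0 : cnt cs k = 0
      · simp only [h0, reduceIte, if_pos rfl]
        exact Prod.ext_iff.mpr ⟨rfl, by push_cast; ring⟩
      · simp only [h0, if_neg h0]
        exact Prod.ext_iff.mpr ⟨rfl, by push_cast; ring⟩

-- what A's loop appends, recursively over the remaining characters
def collectA (idx : List Int) : List Char → Nat → Int → Int → List (Int × Int × Int)
  | [], _, _, _ => []
  | c :: r, s, line, off =>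
    (if ((s : Nat) : Int) ∈ idx then [((s : Int), line, off)] else []) ++
      collectA idx r (s + 1) (if c = '\n' then line + 1 else line) (if c = '\n' then 0 else off + 1)

lemma foldA (idx : List Int) (l : List Char) :
    ∀ (s : Nat) (acc : List (Int × Int × Int)) (line off : Int),
      ((PySem.List.enumerate l (s : Int)).foldl (strA_step idx) (acc, line, off)).1
        = acc ++ collectA idx l s line off := by
  induction l with
  | nil => intro s acc line off; simp [collectA, PySem.List.enumerate_nil]
  | cons c r ih =>
    intro s acc line off
    rw [PySem.List.enumerate_cons, List.foldl_cons]
    have hcast : ((s : Int)) + 1 = (((s + 1 : Nat)) : Int) := by push_cast; ring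
    rw [hcast]
    by_cases hm : ((s : Nat) : Int) ∈ idx <;> by_cases hc : c = '\n' <;>
      simp only [strA_step, hm, hc, if_true, if_false, reduceIte, collectA, ih,
        List.append_assoc, List.nil_append, List.singleton_append]

lemma collectA_eq (idx : List Int) (cs : List Char) :
    ∀ (m s : Nat), m = cs.length - s → s ≤ cs.length →
      collectA idx (cs.drop s) s (stateAt cs s).1 (stateAt cs s).2
        = ((List.range' s (cs.length - s)).filter (fun (k : Nat) => decide ((k : Int) ∈ idx))).map
            (fun (k : Nat) => ((k : Int), stateAt cs k)) := by
  intro m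
  induction m with
  | zero =>
    intro s hm hs
    have hsn : s = cs.length := by omega
    subst hsn
    simp [collectA, List.drop_length]
  | succ m ih =>
    intro s hm hs
    have hsl : s < cs.length := by omega
    rw [List.drop_eq_getElem_cons hsl]
    have hget : cs[s] = cs.getD s ' ' := (List.getD_eq_getElem cs ' ' hsl).symm
    have hnext : stateAt cs (s + 1) = stepCh (stateAt cs s) (cs.getD s ' ') := stateAt_succ cs s hsl
    have hrange : cs.length - s = m + 1 := by omega
    rw [hrange, List.range'_succ]
    have ihr := ih (s + 1) (by omega) (by omega)
    rw [show cs.length - (s + 1) = m from by omega] at ihr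
    by_cases hc : cs.getD s ' ' = '\n' <;> by_cases hm' : ((s : Nat) : Int) ∈ idx <;>
      simp [collectA, hget, hc, hm', ← ihr, hnext, stepCh, Prod.mk.eta,
        ← List.getD_eq_getElem?_getD]

-- A's result as a map over the filtered positions
lemma portA_eq (text : String) (idx : List Int) :
    str_index_to_line_offset text idx
      = ((List.range text.toList.length).filter (fun (k : Nat) => decide ((k : Int) ∈ idx))).map
          (fun (k : Nat) => ((k : Int), stateAt text.toList k)) := by
  unfold str_index_to_line_offset
  have hf := foldA idx text.toList 0 [] 0 0
  norm_num at hf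
  rw [hf]
  have hc0 := collectA_eq idx text.toList (text.toList.length) 0 (by omega) (by omega)
  simp only [List.drop_zero, Nat.sub_zero,
    show stateAt text.toList 0 = (0, 0) from rfl] at hc0
  rw [hc0, ← List.range_eq_range']

-- B's sorted key list is exactly the filtered position range
lemma keys_eq (idx : List Int) (cs : List Char) :
    PySem.List.sorted (PySem.Set.ofList (idx.filter (fun i => decide (0 ≤ i) && decide (i < (cs.length : Int))))) (fun x => x) false
      = ((List.range cs.length).filter (fun (k : Nat) => decide ((k : Int) ∈ idx))).map (fun (k : Nat) => (k : Int)) := by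
  apply PySem.List.sorted_eq_of_perm_of_pairwise_lt
  · rw [List.perm_ext_iff_of_nodup
        (List.Nodup.map (fun a b h => by omega) (List.nodup_range.filter _))
        (PySem.Set.nodup_ofList _)]
    intro y
    rw [List.mem_map, PySem.Set.mem_ofList, List.mem_filter]
    constructor
    · rintro ⟨k, hk, rfl⟩
      rw [List.mem_filter, List.mem_range] at hk
      obtain ⟨hkn, hki⟩ := hk
      simp only [decide_eq_true_eq] at hki
      refine ⟨hki, ?_⟩
      simp only [Bool.and_eq_true, decide_eq_true_eq]
      omega
    · rintro ⟨hy, hb⟩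
      simp only [Bool.and_eq_true, decide_eq_true_eq] at hb
      refine ⟨y.toNat, List.mem_filter.mpr ⟨List.mem_range.mpr (by omega), ?_⟩, by omega⟩
      simp only [decide_eq_true_eq]
      rw [show ((y.toNat : Nat) : Int) = y from by omega]
      exact hy
  · rw [List.pairwise_map]
    exact List.Pairwise.imp (fun h => by exact_mod_cast h) (List.pairwise_lt_range.filter _)

lemma portB_eq (text : String) (idx : List Int) :
    str_index_to_line_offset_alt text idx
      = ((List.range text.toList.length).filter (fun (k : Nat) => decide ((k : Int) ∈ idx))).map
          (fun (k : Nat) => ((k : Int), stateAt text.toList k)) := by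
  simp only [str_index_to_line_offset_alt]
  rw [keys_eq idx text.toList, PySem.List.foldl_append_singleton_eq_map, List.nil_append,
    List.map_map]
  apply List.map_congr_left
  intro k hk
  rw [List.mem_filter, List.mem_range] at hk
  have hkn : k < text.toList.length := hk.1
  set cs := text.toList with hcs
  simp only [Function.comp_def]
  have hline : (((strB_newlines cs).filter (fun p => decide (p < (k : Int)))).length : Int)
      = ((cnt cs k : Nat) : Int) := by
    rw [strB_newlines_eq, List.filter_map]
    rw [List.length_map]
    rw [show ((fun p => decide (p < (k : Int))) ∘ (fun (j : Nat) => (j : Int)))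
        = (fun (j : Nat) => decide (j < k)) from by funext j; simp]
    rw [nlN_filter_lt cs k (Nat.le_of_lt hkn)]
  rw [hline]
  have hstate := stateAt_spec cs k (Nat.le_of_lt hkn)
  by_cases h0 : cnt cs k = 0
  · simp only [h0, Nat.cast_zero, if_pos rfl, hstate]
    simp
  · have hne : ¬ ((cnt cs k : Int) = 0) := by exact_mod_cast h0
    rw [if_neg hne]
    have hcast : ((cnt cs k : Nat) : Int) - 1 = (((cnt cs k - 1 : Nat)) : Int) := by omega
    rw [hcast, PySem.List.pyGetD_natCast, strB_newlines_eq]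
    have hlt : cnt cs k - 1 < (nlN cs).length := by
      have := cnt_le_length cs k (Nat.le_of_lt hkn); omega
    rw [List.getD_eq_getElem _ _ (by simpa using hlt), List.getElem_map]
    rw [hstate, if_neg h0]
    rw [List.getD_eq_getElem _ _ hlt]

-- ===== VERDICT (by name: the statement is the Claim_ definition above) =====
theorem str_index_to_line_offset_spec : Claim_equal_str_index_to_line_offset := by
  intro text idx _
  unfold Spec_str_index_to_line_offset
  rw [portA_eq, portB_eq]
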